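-- pv_equiv track=rewrite | github.com/chrisli0212/Hybrid52 | !Hybrid55_New training/scripts/phase0/preflight_historical_data_1yr.py | _missing_weeks
-- ===== SOURCE A (Python) =====
-- def _missing_weeks(week_keys: list[tuple[int, int]]) -> list[str]:
--     if not week_keys:
--         return []
--     # Build an ordered integer axis: year * 100 + week.
--     vals = sorted({y * 100 + w for y, w in week_keys})
--     missing = []
--     for i in range(len(vals) - 1):
--         a, b = vals[i], vals[i + 1]
--         if b - a <= 1:
--             continue
--         for k in range(a + 1, b):
--             y = k // 100
--             w = k % 100
--             if 1 <= w <= 53: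
--                 missing.append(f"{y}-W{w:02d}")
--     return missing
-- ===== SOURCE B (Python) =====
-- def _missing_weeks(week_keys: list[tuple[int, int]]) -> list[str]:
--     present = {y * 100 + w for y, w in week_keys}
--     if not present:
--         return []
--     lo, hi = min(present), max(present)
--     out = []
--     for year in range(lo // 100, hi // 100 + 1):
--         for w in range(1, 54):
--             code = year * 100 + w
--             if lo < code < hi and code not in present:
--                 out.append(f"{year}-W{w:02d}")
--     return out
-- ===== Notes on version B (the rewrite author's own statement) =====
-- stated objective: alternative
-- what changed: Instead of sorting the distinct codes and walking every consecutive gap integer by integer, B computes min/max of the code set and enumerates the valid (year, week 1..53) grid between them, emitting codes strictly between min and max that are absent from the set; no sort and no per-gap inner scan.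
import Mathlib
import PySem

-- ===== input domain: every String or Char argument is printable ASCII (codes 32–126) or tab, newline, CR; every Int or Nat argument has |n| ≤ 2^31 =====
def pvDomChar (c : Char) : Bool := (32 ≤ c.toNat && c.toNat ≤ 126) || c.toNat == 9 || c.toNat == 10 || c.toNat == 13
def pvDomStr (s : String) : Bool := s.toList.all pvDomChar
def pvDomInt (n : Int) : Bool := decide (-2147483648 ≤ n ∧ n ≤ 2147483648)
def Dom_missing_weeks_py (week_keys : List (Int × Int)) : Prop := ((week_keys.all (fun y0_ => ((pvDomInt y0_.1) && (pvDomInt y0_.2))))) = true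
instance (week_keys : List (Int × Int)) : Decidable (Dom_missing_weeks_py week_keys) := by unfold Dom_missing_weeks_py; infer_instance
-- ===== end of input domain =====

-- B replaces A's sort-then-walk-every-gap-integer with: take min/max of the code set and
-- enumerate the (year, week 1..53) grid between them, keeping absent codes strictly inside.

-- shared formatting helper: f"{y}-W{w:02d}" for 0 ≤ w ≤ 99
def pvWeekStr (y w : Int) : String :=
  PySem.Int.toStr y ++ "-W" ++ (if w < 10 then "0" ++ PySem.Int.toStr w else PySem.Int.toStr w)

-- ===== PORT A =====
def missing_weeks_py (week_keys : List (Int × Int)) : List String :=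
  if week_keys = [] then []
  else
    let vals := PySem.List.sorted (PySem.Set.ofList (week_keys.map (fun p => p.1 * 100 + p.2))) (fun x => x) false
    (PySem.List.pyRange 0 ((vals.length : Int) - 1) 1).foldl (fun missing i =>
      let a := PySem.List.pyGetD vals i 0
      let b := PySem.List.pyGetD vals (i + 1) 0
      if b - a ≤ 1 then missing
      else
        (PySem.List.pyRange (a + 1) b 1).foldl (fun m k =>
          let y := PySem.Int.floordiv k 100
          let w := PySem.Int.mod k 100
          if 1 ≤ w ∧ w ≤ 53 then m ++ [pvWeekStr y w] else m) missing) []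

-- ===== PORT B =====
def missing_weeks_py_alt (week_keys : List (Int × Int)) : List String :=
  let present := PySem.Set.ofList (week_keys.map (fun p => p.1 * 100 + p.2))
  match PySem.List.min? present (fun x => x), PySem.List.max? present (fun x => x) with
  | some lo, some hi =>
      (PySem.List.pyRange (PySem.Int.floordiv lo 100) (PySem.Int.floordiv hi 100 + 1) 1).foldl
        (fun out year =>
          (PySem.List.pyRange 1 54 1).foldl (fun out w =>
            let code := year * 100 + w
            if lo < code ∧ code < hi ∧ code ∉ present then out ++ [pvWeekStr year w] else out) out)
        []
  | _, _ => []

-- ===== PRECONDITION & SPEC =====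
def Spec_missing_weeks_py (week_keys : List (Int × Int)) (out : List String) : Prop := out = missing_weeks_py_alt week_keys
instance (week_keys : List (Int × Int)) (out : List String) : Decidable (Spec_missing_weeks_py week_keys out) := by unfold Spec_missing_weeks_py; infer_instance

-- ===== CLAIM (what is proved, stated in full; the proofs are below) =====
def Claim_equal_missing_weeks_py : Prop := ∀ (week_keys : List (Int × Int)), Dom_missing_weeks_py week_keys → Spec_missing_weeks_py week_keys (missing_weeks_py week_keys)

-- ===== LEMMAS AND PROOFS =====

-- canonical integer-level value both ports reduce to
def pvFmt (k : Int) : String := pvWeekStr (PySem.Int.floordiv k 100) (PySem.Int.mod k 100)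

def pvCanon (lo hi : Int) (ps : List Int) : List String :=
  ((PySem.List.pyRange (lo + 1) hi 1).filter
      (fun k => decide (1 ≤ PySem.Int.mod k 100 ∧ PySem.Int.mod k 100 ≤ 53) && decide (k ∉ ps))).map pvFmt

-- A-side reshaping --------------------------------------------------------

def pvInner (a b : Int) : List String :=
  ((PySem.List.pyRange (a + 1) b 1).filter
      (fun k => decide (1 ≤ PySem.Int.mod k 100 ∧ PySem.Int.mod k 100 ≤ 53))).map pvFmt

def pvGaps : List Int → List String
  | a :: b :: rest => pvInner a b ++ pvGaps (b :: rest)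
  | _ => []

def pvPairs (g : List String → Int → Int → List String) : List Int → List String → List String
  | a :: b :: rest, init => pvPairs g (b :: rest) (g init a b)
  | _, init => init

def pvG (m : List String) (a b : Int) : List String :=
  if b - a ≤ 1 then m
  else
    (PySem.List.pyRange (a + 1) b 1).foldl (fun m k =>
      let y := PySem.Int.floordiv k 100
      let w := PySem.Int.mod k 100
      if 1 ≤ w ∧ w ≤ 53 then m ++ [pvWeekStr y w] else m) m

lemma pvG_eq (m : List String) (a b : Int) : pvG m a b = m ++ pvInner a b := by
  unfold pvG pvInner
  by_cases h : b - a ≤ 1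
  · rw [if_pos h, PySem.List.pyRange_one_eq_nil (by omega)]
    simp
  · rw [if_neg h]
    rw [show (fun (m : List String) (k : Int) =>
        have y := PySem.Int.floordiv k 100
        have w := PySem.Int.mod k 100
        if 1 ≤ w ∧ w ≤ 53 then m ++ [pvWeekStr y w] else m)
      = (fun (m : List String) (k : Int) =>
        if 1 ≤ PySem.Int.mod k 100 ∧ PySem.Int.mod k 100 ≤ 53 then m ++ [pvFmt k] else m) from rfl]
    rw [PySem.List.foldl_append_ite
      (p := fun k => 1 ≤ PySem.Int.mod k 100 ∧ PySem.Int.mod k 100 ≤ 53) (f := pvFmt)]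

lemma pv_foldl_idx_aux (g : List String → Int → Int → List String) :
    ∀ (vals : List Int) (init : List String),
      (List.range (vals.length - 1)).foldl
        (fun m k => g m (vals.getD k 0) (vals.getD (k + 1) 0)) init
      = pvPairs g vals init := by
  intro vals
  induction vals with
  | nil => intro init; simp [pvPairs]
  | cons a t ih =>
    intro init
    cases t with
    | nil => simp [pvPairs]
    | cons b rest =>
      have hlen : (a :: b :: rest).length - 1 = rest.length + 1 := by simp
      rw [hlen, List.range_succ_eq_map]
      simp only [List.foldl_cons, List.foldl_map, List.getD_cons_zero, List.getD_cons_succ]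
      have ih' := ih (g init a b)
      simp only [List.length_cons, Nat.add_sub_cancel, List.getD_cons_succ] at ih'
      exact ih'.trans rfl

lemma pvPairs_pvG : ∀ (vals : List Int) (init : List String),
    pvPairs pvG vals init = init ++ pvGaps vals := by
  intro vals
  induction vals with
  | nil => intro init; simp [pvPairs, pvGaps]
  | cons a t ih =>
    intro init
    cases t with
    | nil => simp [pvPairs, pvGaps]
    | cons b rest =>
      show pvPairs pvG (b :: rest) (pvG init a b) = init ++ pvGaps (a :: b :: rest)
      rw [ih (pvG init a b), pvG_eq]
      show init ++ pvInner a b ++ pvGaps (b :: rest) = init ++ (pvInner a b ++ pvGaps (b :: rest))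
      rw [List.append_assoc]

theorem missing_weeks_py_eq_gaps (week_keys : List (Int × Int)) (h : week_keys ≠ []) :
    missing_weeks_py week_keys =
      pvGaps (PySem.List.sorted (PySem.Set.ofList (week_keys.map (fun p => p.1 * 100 + p.2))) (fun x => x) false) := by
  unfold missing_weeks_py
  rw [if_neg h]
  simp only []
  set vals := PySem.List.sorted (PySem.Set.ofList (week_keys.map (fun p => p.1 * 100 + p.2))) (fun x => x) false with hv
  have hne : vals ≠ [] := by
    rw [hv, Ne, PySem.List.sorted_eq_nil_iff]
    intro hps
    have : week_keys.map (fun p => p.1 * 100 + p.2) = [] := by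
      cases hcs : week_keys.map (fun p => p.1 * 100 + p.2) with
      | nil => rfl
      | cons c cs =>
        exfalso
        have : c ∈ PySem.Set.ofList (week_keys.map (fun p => p.1 * 100 + p.2)) := by
          rw [PySem.Set.mem_ofList, hcs]; exact List.mem_cons_self
        rw [hps] at this; exact (List.not_mem_nil) this
    exact h (List.map_eq_nil_iff.mp this)
  have hpos : 0 < vals.length := List.length_pos_of_ne_nil hne
  have hlen : ((vals.length : Int) - 1) = ((vals.length - 1 : Nat) : Int) := by
    push_cast [hpos]
    omega
  rw [hlen, PySem.List.pyRange_zero_nat]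
  rw [List.foldl_map]
  have hstep : (fun (missing : List String) (k : Nat) =>
      (fun (missing : List String) (i : Int) =>
        let a := PySem.List.pyGetD vals i 0
        let b := PySem.List.pyGetD vals (i + 1) 0
        if b - a ≤ 1 then missing
        else
          (PySem.List.pyRange (a + 1) b 1).foldl (fun m k =>
            let y := PySem.Int.floordiv k 100
            let w := PySem.Int.mod k 100
            if 1 ≤ w ∧ w ≤ 53 then m ++ [pvWeekStr y w] else m) missing) missing (k : Int))
      = (fun (m : List String) (k : Nat) => pvG m (vals.getD k 0) (vals.getD (k + 1) 0)) := by
    funext m k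
    have h1 : PySem.List.pyGetD vals (k : Int) 0 = vals.getD k 0 := PySem.List.pyGetD_natCast vals k 0
    have h2 : PySem.List.pyGetD vals ((k : Int) + 1) 0 = vals.getD (k + 1) 0 := by
      have : ((k : Int) + 1) = ((k + 1 : Nat) : Int) := by push_cast; ring
      rw [this, PySem.List.pyGetD_natCast]
    simp only [h1, h2, pvG]
  rw [hstep, pv_foldl_idx_aux pvG vals [], pvPairs_pvG]
  simp

-- chain facts -------------------------------------------------------------

lemma pv_chain_le_last : ∀ (t : List Int) (b last : Int),
    (b :: t).Pairwise (· < ·) → (b :: t).getLast? = some last → ∀ y ∈ b :: t, y ≤ last := by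
  intro t
  induction t with
  | nil =>
    intro b last _ hl y hy
    simp at hl hy
    omega
  | cons c t' ih =>
    intro b last hp hl y hy
    rw [List.getLast?_cons_cons] at hl
    have hp' := hp.of_cons
    have hc : c ≤ last := ih c last hp' hl c List.mem_cons_self
    rcases List.mem_cons.mp hy with rfl | hy'
    · have hbc : y < c := (List.pairwise_cons.mp hp).1 c List.mem_cons_self
      omega
    · exact ih c last hp' hl y hy'

theorem pvGaps_eq_canon (ps : List Int) : ∀ (t : List Int) (a last : Int),
    (a :: t).Pairwise (· < ·) → (a :: t).getLast? = some last →
    (∀ x ∈ ps, x ∈ a :: t ∨ x ≤ a) → (∀ x ∈ a :: t, x ∈ ps) →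
    pvGaps (a :: t) = pvCanon a last ps := by
  intro t
  induction t with
  | nil =>
    intro a last _ hl _ _
    simp at hl
    subst hl
    unfold pvGaps pvCanon
    rw [PySem.List.pyRange_one_eq_nil (by omega)]
    simp
  | cons b rest ih =>
    intro a last hp hl h1 h2
    have hab : a < b := (List.pairwise_cons.mp hp).1 b List.mem_cons_self
    have hp' : (b :: rest).Pairwise (· < ·) := hp.of_cons
    have hl' : (b :: rest).getLast? = some last := by rwa [List.getLast?_cons_cons] at hl
    have hble : b ≤ last := pv_chain_le_last rest b last hp' hl' b List.mem_cons_self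
    have h1' : ∀ x ∈ ps, x ∈ b :: rest ∨ x ≤ b := by
      intro x hx
      rcases h1 x hx with hmem | hle
      · rcases List.mem_cons.mp hmem with rfl | h
        · right; omega
        · left; exact h
      · right; omega
    have h2' : ∀ x ∈ b :: rest, x ∈ ps := fun x hx => h2 x (List.mem_cons_of_mem a hx)
    have hIH := ih b last hp' hl' h1' h2'
    show pvInner a b ++ pvGaps (b :: rest) = pvCanon a last ps
    rw [hIH]
    unfold pvCanon
    rw [PySem.List.pyRange_one_append (a + 1) b last (by omega) hble]
    rw [List.filter_append, List.map_append]
    congr 1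
    · -- first segment: nothing in ps lies strictly between a and b
      unfold pvInner
      congr 1
      apply List.filter_congr
      intro k hk
      rw [PySem.List.mem_pyRange_one] at hk
      have hknps : k ∉ ps := by
        intro hkps
        rcases h1 k hkps with hmem | hle
        · rcases List.mem_cons.mp hmem with rfl | hmem'
          · omega
          · rcases List.mem_cons.mp hmem' with rfl | hrest
            · omega
            · have : b < k := (List.pairwise_cons.mp hp').1 k hrest
              omega
        · omega
      simp [hknps]
    · -- second segment: drop b itself (it is present), then the tail canon
      have hbps : b ∈ ps := h2 b (List.mem_cons_of_mem a List.mem_cons_self)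
      by_cases hblt : b < last
      · rw [PySem.List.pyRange_one_cons hblt]
        rw [List.filter_cons]
        simp only [hbps, not_true_eq_false, decide_false, Bool.and_false]
        rfl
      · have hbl : b = last := by omega
        subst hbl
        rw [PySem.List.pyRange_one_eq_nil (by omega), PySem.List.pyRange_one_eq_nil (by omega)]

-- B-side reshaping --------------------------------------------------------

lemma pv_code_fdiv (y w : Int) (h1 : 0 ≤ w) (h2 : w < 100) :
    PySem.Int.floordiv (y * 100 + w) 100 = y ∧ PySem.Int.mod (y * 100 + w) 100 = w := by
  have hd : PySem.Int.floordiv (y * 100 + w) 100 = y := by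
    rw [PySem.Int.floordiv_eq_iff_of_pos (by norm_num)]
    constructor <;> omega
  refine ⟨hd, ?_⟩
  have := PySem.Int.floordiv_mul_add_mod (y * 100 + w) 100
  rw [hd] at this
  omega

lemma pv_fdiv_mono (x k : Int) (h : x ≤ k) :
    PySem.Int.floordiv x 100 ≤ PySem.Int.floordiv k 100 := by
  rw [PySem.Int.le_floordiv_iff_mul_le (by norm_num)]
  have h1 := PySem.Int.floordiv_mul_add_mod x 100
  have h2 := PySem.Int.mod_nonneg x (b := 100) (by norm_num)
  omega

def pvBlock (lo hi : Int) (ps : List Int) (y : Int) : List String :=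
  ((PySem.List.pyRange 1 54 1).filter
      (fun w => decide (lo < y * 100 + w ∧ y * 100 + w < hi ∧ y * 100 + w ∉ ps))).map
    (fun w => pvWeekStr y w)

def pvZ (lo hi : Int) (ps : List Int) (y : Int) : List Int :=
  ((PySem.List.pyRange 1 54 1).map (fun w => y * 100 + w)).filter
    (fun k => decide (lo < k ∧ k < hi ∧ k ∉ ps))

lemma pvBlock_eq (lo hi : Int) (ps : List Int) (y : Int) :
    pvBlock lo hi ps y = (pvZ lo hi ps y).map pvFmt := by
  unfold pvBlock pvZ
  rw [List.filter_map, List.map_map]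
  have hpred : List.filter ((fun k => decide (lo < k ∧ k < hi ∧ k ∉ ps)) ∘ fun w => y * 100 + w)
        (PySem.List.pyRange 1 54 1)
      = List.filter (fun w => decide (lo < y * 100 + w ∧ y * 100 + w < hi ∧ y * 100 + w ∉ ps))
        (PySem.List.pyRange 1 54 1) := by
    apply List.filter_congr
    intro w _
    rfl
  rw [hpred]
  apply List.map_congr_left
  intro w hw
  have hw' := (PySem.List.mem_pyRange_one).mp (List.mem_of_mem_filter hw)
  have hc := pv_code_fdiv y w (by omega) (by omega)
  simp only [Function.comp_apply, pvFmt, hc.1, hc.2]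

lemma pvZ_pairwise (lo hi : Int) (ps : List Int) (y : Int) :
    (pvZ lo hi ps y).Pairwise (· < ·) := by
  apply List.Pairwise.filter
  rw [List.pairwise_map]
  exact (PySem.List.pairwise_lt_pyRange_one 1 54).imp (by intro a b h; omega)

lemma pvZ_mem (lo hi : Int) (ps : List Int) (y k : Int) :
    k ∈ pvZ lo hi ps y ↔
      (∃ w, 1 ≤ w ∧ w < 54 ∧ k = y * 100 + w) ∧ lo < k ∧ k < hi ∧ k ∉ ps := by
  unfold pvZ
  simp only [List.mem_filter, List.mem_map, PySem.List.mem_pyRange_one, decide_eq_true_eq]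
  constructor
  · rintro ⟨⟨w, ⟨hw1, hw2⟩, rfl⟩, h⟩
    exact ⟨⟨w, hw1, hw2, rfl⟩, h⟩
  · rintro ⟨⟨w, hw1, hw2, rfl⟩, h⟩
    exact ⟨⟨w, ⟨hw1, hw2⟩, rfl⟩, h⟩

theorem missing_weeks_py_alt_eq_canon (week_keys : List (Int × Int)) (lo hi : Int)
    (hlo : PySem.List.min? (PySem.Set.ofList (week_keys.map (fun p => p.1 * 100 + p.2))) (fun x => x) = some lo)
    (hhi : PySem.List.max? (PySem.Set.ofList (week_keys.map (fun p => p.1 * 100 + p.2))) (fun x => x) = some hi) :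
    missing_weeks_py_alt week_keys =
      pvCanon lo hi (PySem.Set.ofList (week_keys.map (fun p => p.1 * 100 + p.2))) := by
  unfold missing_weeks_py_alt
  simp only []
  rw [hlo, hhi]
  simp only []
  set ps := PySem.Set.ofList (week_keys.map (fun p => p.1 * 100 + p.2)) with hps
  -- inner loop → pvBlock, outer loop → flatMap
  have houter : (fun (out : List String) (year : Int) =>
      (PySem.List.pyRange 1 54 1).foldl (fun out w =>
        let code := year * 100 + w
        if lo < code ∧ code < hi ∧ code ∉ ps then out ++ [pvWeekStr year w] else out) out)
      = (fun (out : List String) (year : Int) => out ++ pvBlock lo hi ps year) := by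
    funext out year
    rw [show (fun (out : List String) (w : Int) =>
        let code := year * 100 + w
        if lo < code ∧ code < hi ∧ code ∉ ps then out ++ [pvWeekStr year w] else out)
      = (fun (out : List String) (w : Int) =>
        if lo < year * 100 + w ∧ year * 100 + w < hi ∧ year * 100 + w ∉ ps
        then out ++ [pvWeekStr year w] else out) from rfl]
    rw [PySem.List.foldl_append_ite
      (p := fun w => lo < year * 100 + w ∧ year * 100 + w < hi ∧ year * 100 + w ∉ ps)
      (f := fun w => pvWeekStr year w)]
    rfl
  rw [houter, PySem.List.foldl_append_eq_flatMap, List.nil_append]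
  -- blocks to integer form
  rw [List.flatMap_congr (g := fun y => (pvZ lo hi ps y).map pvFmt)
    (fun y _ => pvBlock_eq lo hi ps y)]
  rw [← List.map_flatMap]
  -- the flattened grid equals the canonical filtered range
  unfold pvCanon
  congr 1
  set Ys := PySem.List.pyRange (PySem.Int.floordiv lo 100) (PySem.Int.floordiv hi 100 + 1) 1 with hYs
  set Z := Ys.flatMap (pvZ lo hi ps) with hZ
  set X := (PySem.List.pyRange (lo + 1) hi 1).filter
      (fun k => decide (1 ≤ PySem.Int.mod k 100 ∧ PySem.Int.mod k 100 ≤ 53) && decide (k ∉ ps)) with hX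
  have hZpw : Z.Pairwise (· < ·) := by
    rw [hZ, List.pairwise_flatMap]
    refine ⟨fun y _ => pvZ_pairwise lo hi ps y, ?_⟩
    refine (PySem.List.pairwise_lt_pyRange_one _ _).imp ?_
    intro y1 y2 h12 x hx x' hx'
    obtain ⟨⟨w, hw1, hw2, rfl⟩, -⟩ := (pvZ_mem lo hi ps y1 x).mp hx
    obtain ⟨⟨w', hw1', hw2', rfl⟩, -⟩ := (pvZ_mem lo hi ps y2 x').mp hx'
    have : y1 + 1 ≤ y2 := h12
    nlinarith
  have hXpw : X.Pairwise (· < ·) :=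
    List.Pairwise.filter _ (PySem.List.pairwise_lt_pyRange_one _ _)
  have hmem : ∀ k, k ∈ Z ↔ k ∈ X := by
    intro k
    rw [hZ, hX, List.mem_flatMap, List.mem_filter]
    constructor
    · rintro ⟨y, hy, hkz⟩
      obtain ⟨⟨w, hw1, hw2, rfl⟩, hlo', hhi', hnps⟩ := (pvZ_mem lo hi ps y k).mp hkz
      have hc := pv_code_fdiv y w (by omega) (by omega)
      refine ⟨PySem.List.mem_pyRange_one.mpr ⟨by omega, hhi'⟩, ?_⟩
      simp only [Bool.and_eq_true, decide_eq_true_eq]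
      exact ⟨by rw [hc.2]; omega, hnps⟩
    · rintro ⟨hkr, hkp⟩
      have hkr' := PySem.List.mem_pyRange_one.mp hkr
      simp only [Bool.and_eq_true, decide_eq_true_eq] at hkp
      refine ⟨PySem.Int.floordiv k 100, ?_, ?_⟩
      · rw [hYs, PySem.List.mem_pyRange_one]
        constructor
        · exact pv_fdiv_mono lo k (by omega)
        · have := pv_fdiv_mono k hi (by omega)
          omega
      · rw [pvZ_mem]
        have hsplit := PySem.Int.floordiv_mul_add_mod k 100
        exact ⟨⟨PySem.Int.mod k 100, by omega, by omega, by omega⟩, by omega, by omega, hkp.2⟩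
  have hnZ : Z.Nodup := hZpw.imp (fun h => ne_of_lt h)
  have hnX : X.Nodup := hXpw.imp (fun h => ne_of_lt h)
  exact List.Perm.eq_of_pairwise (fun a b _ _ h1 h2 => le_antisymm h1 h2)
    (hZpw.imp le_of_lt) (hXpw.imp le_of_lt)
    ((List.perm_ext_iff_of_nodup hnZ hnX).mpr hmem)

-- ===== VERDICT (by name: the statement is the Claim_ definition above) =====
theorem missing_weeks_py_spec : Claim_equal_missing_weeks_py := by
  intro week_keys _
  unfold Spec_missing_weeks_py
  by_cases h : week_keys = []
  · subst h; rfl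
  · set ps := PySem.Set.ofList (week_keys.map (fun p => p.1 * 100 + p.2)) with hps
    have hcs : week_keys.map (fun p => p.1 * 100 + p.2) ≠ [] :=
      fun hc => h (List.map_eq_nil_iff.mp hc)
    obtain ⟨c, hc⟩ := List.exists_mem_of_ne_nil _ hcs
    have hcm : c ∈ ps := (PySem.Set.mem_ofList _ c).mpr hc
    have hpsne : ps ≠ [] := by intro hn; rw [hn] at hcm; exact List.not_mem_nil hcm
    obtain ⟨lo, hlo⟩ : ∃ lo, PySem.List.min? ps (fun x => x) = some lo := by
      cases hm : PySem.List.min? ps (fun x => x) with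
      | none => exact absurd ((PySem.List.min?_eq_none_iff _ _).mp hm) hpsne
      | some lo => exact ⟨lo, rfl⟩
    obtain ⟨hi, hhi⟩ : ∃ hi, PySem.List.max? ps (fun x => x) = some hi := by
      cases hm : PySem.List.max? ps (fun x => x) with
      | none => exact absurd ((PySem.List.max?_eq_none_iff _ _).mp hm) hpsne
      | some hi => exact ⟨hi, rfl⟩
    have hvpw : (PySem.List.sorted ps (fun x => x) false).Pairwise (· < ·) :=
      PySem.List.sorted_ofList_pairwise_lt _
    have hvne : PySem.List.sorted ps (fun x => x) false ≠ [] := by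
      rw [Ne, PySem.List.sorted_eq_nil_iff]; exact hpsne
    cases hv : PySem.List.sorted ps (fun x => x) false with
    | nil => exact absurd hv hvne
    | cons a t =>
      rw [hv] at hvpw
      have hmemv : ∀ x : Int, x ∈ ps ↔ x ∈ a :: t := by
        intro x
        rw [← hv, PySem.List.mem_sorted]
      obtain ⟨last, hl⟩ : ∃ last, (a :: t).getLast? = some last := by
        cases hgl : (a :: t).getLast? with
        | none => exact absurd (List.getLast?_eq_none_iff.mp hgl) (List.cons_ne_nil a t)
        | some last => exact ⟨last, rfl⟩
      have hlastmem : last ∈ a :: t := by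
        obtain ⟨ys, hys⟩ := List.getLast?_eq_some_iff.mp hl
        rw [hys]; simp
      -- head = min, last = max
      have halo : a = lo := by
        have h1 : lo ≤ a := PySem.List.min?_isMin hlo a ((hmemv a).mpr List.mem_cons_self)
        have h2 : a ≤ lo := PySem.List.key_head_sorted_le ps (fun x => x) hv lo (PySem.List.min?_mem hlo)
        omega
      have hlhi : last = hi := by
        have h1 : last ≤ hi := PySem.List.max?_isMax hhi last ((hmemv last).mpr hlastmem)
        have h2 : hi ≤ last := pv_chain_le_last t a last hvpw hl hi ((hmemv hi).mp (PySem.List.max?_mem hhi))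
        omega
      rw [missing_weeks_py_eq_gaps week_keys h, ← hps, hv]
      rw [pvGaps_eq_canon ps t a last hvpw hl
        (fun x hx => Or.inl ((hmemv x).mp hx)) (fun x hx => (hmemv x).mpr hx)]
      rw [missing_weeks_py_alt_eq_canon week_keys lo hi (hps ▸ hlo) (hps ▸ hhi), ← hps, halo, hlhi]
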